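-- pv_equiv track=rewrite | github.com/miliar/Code_Jam_Webscraper | solutions_python/Problem_187/983.py | possible_removals
-- ===== SOURCE A (Python) =====
-- def parties_remaining(p):
--     return [x for x in range(len(p)) if p[x] != 0]
--
-- def remove(param, p):
--     ret = list(p)
--     for removal in param:
--         ret[removal] -= 1
--     return ret
--
-- def possible_removals(p):
--     removing_one = parties_remaining(p)
--     ret = []
--     for party in removing_one:
--         left = remove([party], p)
--         for x in parties_remaining(left):
--             ret.append([party, x])
--     ret.extend([[x] for x in removing_one])
--     return ret
-- ===== SOURCE B (Python) =====
-- def possible_removals(p):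
--     # Simpler: precompute the nonzero indices once; no list copies, no rescans.
--     remaining = [i for i in range(len(p)) if p[i] != 0]
--     ret = [[a, b] for a in remaining for b in remaining if a != b or p[a] != 1]
--     ret += [[x] for x in remaining]
--     return ret
-- ===== Notes on version B (the rewrite author's own statement) =====
-- stated objective: simpler
-- what changed: B precomputes the nonzero-index list once and builds pairs with a direct comprehension guard (a != b or p[a] != 1), eliminating A's per-iteration list copy (remove) and per-iteration rescan (parties_remaining(left)).
import Mathlib
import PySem

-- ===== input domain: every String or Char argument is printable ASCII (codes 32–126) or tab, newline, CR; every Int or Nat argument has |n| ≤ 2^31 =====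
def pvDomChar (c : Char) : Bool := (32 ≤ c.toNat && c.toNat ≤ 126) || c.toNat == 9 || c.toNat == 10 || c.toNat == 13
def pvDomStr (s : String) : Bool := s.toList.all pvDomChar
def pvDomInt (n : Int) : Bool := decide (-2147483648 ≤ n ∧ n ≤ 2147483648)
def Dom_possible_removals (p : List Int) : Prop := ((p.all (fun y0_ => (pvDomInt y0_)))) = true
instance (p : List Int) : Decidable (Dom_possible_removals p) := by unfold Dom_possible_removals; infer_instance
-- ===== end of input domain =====

-- B is simpler: the nonzero-index list is computed once and pairs come from a direct guard,
-- removing A's per-iteration list copy (`remove`) and rescan (`parties_remaining(left)`).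

-- ===== PORT A =====
-- [x for x in range(len(p)) if p[x] != 0]
def pvPartiesRemaining (p : List Int) : List Int :=
  (PySem.List.pyRange 0 (p.length : Int) 1).filter (fun x => PySem.List.pyGetD p x 0 ≠ 0)

-- ret = list(p); for removal in param: ret[removal] -= 1  (indices here are always in range)
def pvRemove (param : List Int) (p : List Int) : List Int :=
  param.foldl (fun ret r => PySem.List.pySetD ret r (PySem.List.pyGetD ret r 0 - 1)) p

def possible_removals (p : List Int) : List (List Int) :=
  let removing_one := pvPartiesRemaining p
  let ret := removing_one.foldl
    (fun ret party =>
      let left := pvRemove [party] p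
      (pvPartiesRemaining left).foldl (fun ret x => ret ++ [[party, x]]) ret)
    ([] : List (List Int))
  ret ++ removing_one.map (fun x => [x])

-- ===== PORT B =====
def possible_removals_alt (p : List Int) : List (List Int) :=
  let remaining := (PySem.List.pyRange 0 (p.length : Int) 1).filter (fun i => PySem.List.pyGetD p i 0 ≠ 0)
  let pairs := remaining.flatMap (fun a =>
    (remaining.filter (fun b => a ≠ b ∨ PySem.List.pyGetD p a 0 ≠ 1)).map (fun b => [a, b]))
  pairs ++ remaining.map (fun x => [x])

-- ===== PRECONDITION & SPEC =====
def Spec_possible_removals (p : List Int) (out : List (List Int)) : Prop := out = possible_removals_alt p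
instance (p : List Int) (out : List (List Int)) : Decidable (Spec_possible_removals p out) := by unfold Spec_possible_removals; infer_instance

-- ===== CLAIM (what is proved, stated in full; the proofs are below) =====
def Claim_equal_possible_removals : Prop := ∀ (p : List Int), Dom_possible_removals p → Spec_possible_removals p (possible_removals p)

-- ===== LEMMAS AND PROOFS =====

-- After decrementing index `party` (a nonzero in-range index), the remaining nonzero
-- indices are exactly the old ones with the diagonal guard `party ≠ b ∨ p[party] ≠ 1`.
theorem pvPartiesRemaining_remove (p : List Int) (party : Int)
    (h : party ∈ pvPartiesRemaining p) :
    pvPartiesRemaining (pvRemove [party] p) =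
      (pvPartiesRemaining p).filter (fun b => party ≠ b ∨ PySem.List.pyGetD p party 0 ≠ 1) := by
  unfold pvPartiesRemaining at h ⊢
  rw [List.mem_filter] at h
  obtain ⟨hr, hv⟩ := h
  rw [PySem.List.mem_pyRange_one] at hr
  obtain ⟨h0, hlt⟩ := hr
  have hv' : PySem.List.pyGetD p party 0 ≠ 0 := by simpa using hv
  unfold pvRemove
  simp only [List.foldl_cons, List.foldl_nil]
  rw [List.filter_filter]
  have hlen : (PySem.List.pySetD p party (PySem.List.pyGetD p party 0 - 1)).length = p.length :=
    PySem.List.length_pySetD ..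
  rw [hlen]
  apply List.filter_congr
  intro x hx
  rw [PySem.List.mem_pyRange_one] at hx
  have hp : party = ((party.toNat : Nat) : Int) := (Int.toNat_of_nonneg h0).symm
  have hnl : party.toNat < p.length := by omega
  have hxe : PySem.List.pyGetD (PySem.List.pySetD p party (PySem.List.pyGetD p party 0 - 1)) x 0
      = if x = party then PySem.List.pyGetD p party 0 - 1 else PySem.List.pyGetD p x 0 := by
    have hq : x = ((x.toNat : Nat) : Int) := (Int.toNat_of_nonneg hx.1).symm
    rw [hp, hq, PySem.List.pyGetD_pySetD_natCast (hn := hnl), ← hp, ← hq]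
    exact if_congr (by omega) rfl rfl
  by_cases hxp : x = party
  · subst hxp
    simp only [hxe]
    simp [hv']
    omega
  · simp [hxe, hxp, Ne.symm hxp]

theorem possible_removals_flat (p : List Int) :
    possible_removals p =
      (pvPartiesRemaining p).flatMap
        (fun party => (pvPartiesRemaining (pvRemove [party] p)).map (fun x => [party, x]))
      ++ (pvPartiesRemaining p).map (fun x => [x]) := by
  unfold possible_removals
  simp only [PySem.List.foldl_append_singleton_eq_map, PySem.List.foldl_append_eq_flatMap,
    List.nil_append]

-- ===== VERDICT (by name: the statement is the Claim_ definition above) =====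
theorem possible_removals_spec : Claim_equal_possible_removals := by
  intro p _
  unfold Spec_possible_removals possible_removals_alt
  rw [possible_removals_flat]
  congr 1
  exact List.flatMap_congr (fun party hmem => by
    rw [pvPartiesRemaining_remove p party hmem]; rfl)
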